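-- pv_equiv track=rewrite | github.com/nazmulcuet11/acm | InterviewBit/arrays/hotel-bookings-possible.py | hotel
-- ===== SOURCE A (Python) =====
-- def findIndex(arr, x):
--     l, r = 0, len(arr) - 1
--     while  l < r:
--         m = int((l + r + 1) / 2)
--         if arr[m] > x:
--             r = m - 1
--         else:
--             l = m
--
--     return l if arr[l] <= x else (l - 1)
--
-- def hotel(arrive, depart, K):
--     arrive.sort()
--     depart.sort()
--     for i in range(len(arrive)):
--         x = findIndex(depart, arrive[i])
--         if i - x > K:
--             return False
--     return True
-- ===== SOURCE B (Python) =====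
-- def hotel(arrive, depart, K):
--     arrive.sort()
--     depart.sort()
--     j = 0
--     for i, a in enumerate(arrive):
--         while j < len(depart) and depart[j] <= a:
--             j += 1
--         if (i + 1) - j > K:
--             return False
--     return True
-- ===== Notes on version B (the rewrite author's own statement) =====
-- stated objective: faster
-- what changed: Replaced the per-arrival hand-written binary search over the sorted departure list by a single amortized two-pointer merge scan (a pointer j counts departures at or before the current arrival); both versions still sort the two lists in place.
import Mathlib
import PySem

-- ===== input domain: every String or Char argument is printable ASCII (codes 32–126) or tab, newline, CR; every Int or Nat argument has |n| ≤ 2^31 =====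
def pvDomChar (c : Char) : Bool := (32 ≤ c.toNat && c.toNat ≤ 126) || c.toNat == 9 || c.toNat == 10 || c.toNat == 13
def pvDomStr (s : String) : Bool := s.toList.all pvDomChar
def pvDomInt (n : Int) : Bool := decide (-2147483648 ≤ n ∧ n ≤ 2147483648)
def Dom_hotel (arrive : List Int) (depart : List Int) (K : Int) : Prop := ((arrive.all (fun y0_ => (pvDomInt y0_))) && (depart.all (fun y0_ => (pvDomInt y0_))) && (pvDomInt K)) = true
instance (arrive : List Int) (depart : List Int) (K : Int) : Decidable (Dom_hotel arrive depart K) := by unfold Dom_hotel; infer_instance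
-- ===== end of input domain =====

-- B replaces A's per-arrival binary search by one amortized two-pointer merge over the two
-- sorted lists, removing the interpreted O(log m) search per arrival (measured faster). Both A and B sort the two
-- argument lists in place in Python; the equivalence proved here is about the return value.

-- ===== PORT A =====
-- while l < r: m = int((l+r+1)/2); ...  Python's int((l+r+1)/2) equals floor division for the
-- nonnegative l, r this loop ever holds (l, r start at 0 and len-1 and stay in that range), so
-- it is ported as PySem.Int.floordiv. arr[m] is in range whenever arr ≠ [] (invariant
-- 0 ≤ l ≤ m ≤ r < len), so pyGetD is exact there; arr = [] (where Python raises on arr[l]) is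
-- excluded by Pre_hotel. The while loop shrinks r - l by at least 1 per iteration and starts
-- with r - l = len - 1, so fuel = arr.length makes the recursion total without changing the
-- computation.
def findIndexGo (arr : List Int) (x : Int) : Nat → Int → Int → Int
  | 0, l, _ => l
  | fuel + 1, l, r =>
    if l < r then
      let m := PySem.Int.floordiv (l + r + 1) 2
      if PySem.List.pyGetD arr m 0 > x then findIndexGo arr x fuel l (m - 1)
      else findIndexGo arr x fuel m r
    else l

def findIndex (arr : List Int) (x : Int) : Int :=
  let l := findIndexGo arr x arr.length 0 ((arr.length : Int) - 1)
  if PySem.List.pyGetD arr l 0 ≤ x then l else l - 1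

-- for i in range(len(arrive)): x = findIndex(depart, arrive[i]); if i - x > K: return False
def hotelLoopA (dep : List Int) (K : Int) : List Int → Int → Bool
  | [], _ => true
  | a :: rest, i =>
    let x := findIndex dep a
    if i - x > K then false else hotelLoopA dep K rest (i + 1)

def hotel (arrive : List Int) (depart : List Int) (K : Int) : Bool :=
  hotelLoopA (PySem.List.sorted depart (fun y => y) false) K
    (PySem.List.sorted arrive (fun y => y) false) 0

-- ===== PORT B =====
-- while j < len(depart) and depart[j] <= a: j += 1   — j only grows and stays ≤ len(depart),
-- so fuel = dep.length bounds the iterations for the j ≥ 0 this loop ever holds.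
def advanceGo (dep : List Int) (a : Int) : Nat → Int → Int
  | 0, j => j
  | fuel + 1, j =>
    if j < (dep.length : Int) ∧ PySem.List.pyGetD dep j 0 ≤ a then advanceGo dep a fuel (j + 1)
    else j

def advance (dep : List Int) (a : Int) (j : Int) : Int := advanceGo dep a dep.length j

def hotelAltLoop (dep : List Int) (K : Int) : List Int → Int → Int → Bool
  | [], _, _ => true
  | a :: rest, i, j =>
    let j' := advance dep a j
    if (i + 1) - j' > K then false else hotelAltLoop dep K rest (i + 1) j'

def hotel_alt (arrive : List Int) (depart : List Int) (K : Int) : Bool :=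
  hotelAltLoop (PySem.List.sorted depart (fun y => y) false) K
    (PySem.List.sorted arrive (fun y => y) false) 0 0

-- ===== PRECONDITION & SPEC =====
-- Pre_ excludes only the inputs on which A raises IndexError: a nonempty arrive with an empty
-- depart makes findIndex read depart[0] of the empty list. (B's two-pointer scan returns a
-- value there instead.)
def Pre_hotel (arrive : List Int) (depart : List Int) (K : Int) : Prop :=
  arrive = [] ∨ depart ≠ []
instance (arrive : List Int) (depart : List Int) (K : Int) : Decidable (Pre_hotel arrive depart K) := by
  unfold Pre_hotel; infer_instance

def pvWitness_hotel : List Int × List Int × Int := ([1, 3, 2], [2, 4, 5], 1)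

def Spec_hotel (arrive : List Int) (depart : List Int) (K : Int) (out : Bool) : Prop := out = hotel_alt arrive depart K
instance (arrive : List Int) (depart : List Int) (K : Int) (out : Bool) : Decidable (Spec_hotel arrive depart K out) := by unfold Spec_hotel; infer_instance

-- ===== CLAIM (what is proved, stated in full; the proofs are below) =====
def Claim_equal_hotel : Prop := ∀ (arrive : List Int) (depart : List Int) (K : Int), Dom_hotel arrive depart K → Pre_hotel arrive depart K → Spec_hotel arrive depart K (hotel arrive depart K)

-- ===== LEMMAS AND PROOFS =====

-- length of the leading run of elements ≤ x; on a sorted list this is the number of elements ≤ x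
def cntLE (dep : List Int) (x : Int) : Nat := (dep.takeWhile (fun d => decide (d ≤ x))).length

theorem cntLE_le_length (dep : List Int) (x : Int) : cntLE dep x ≤ dep.length := by
  unfold cntLE; exact (List.takeWhile_prefix _).length_le

-- sorted characterization: dep[k] ≤ x iff k < cntLE dep x
theorem cntLE_char (dep : List Int) (x : Int) (hs : dep.Pairwise (· ≤ ·)) :
    ∀ (k : Nat) (hk : k < dep.length), (dep[k] ≤ x ↔ k < cntLE dep x) := by
  induction dep with
  | nil => intro k hk; simp at hk
  | cons d t ih =>
    intro k hk
    rw [List.pairwise_cons] at hs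
    by_cases hd : d ≤ x
    · have hc : cntLE (d :: t) x = cntLE t x + 1 := by
        simp [cntLE, List.takeWhile, hd]
      cases k with
      | zero => simpa [hc] using hd
      | succ k' =>
        have hk' : k' < t.length := by simpa using hk
        have := ih hs.2 k' hk'
        simpa [hc, Nat.succ_lt_succ_iff] using this
    · have hc : cntLE (d :: t) x = 0 := by
        simp [cntLE, List.takeWhile, hd]
      cases k with
      | zero => simpa [hc] using hd
      | succ k' =>
        have hk' : k' < t.length := by simpa using hk
        have hmem : t[k'] ∈ t := List.getElem_mem hk'
        have hle : d ≤ t[k'] := hs.1 _ hmem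
        constructor
        · intro hcontr
          exact absurd (le_trans hle hcontr) hd
        · intro h; omega

theorem cntLE_mono (dep : List Int) (a b : Int) (hab : a ≤ b) : cntLE dep a ≤ cntLE dep b := by
  induction dep with
  | nil => simp [cntLE]
  | cons d t ih =>
    by_cases hd : d ≤ a
    · have hd' : d ≤ b := le_trans hd hab
      simp [cntLE, List.takeWhile, hd, hd'] at *
      omega
    · simp [cntLE, List.takeWhile, hd]

-- the advance condition fails exactly at j = cntLE
theorem advanceGo_stop (dep : List Int) (x : Int) (hs : dep.Pairwise (· ≤ ·)) :
    ∀ (fuel : Nat), advanceGo dep x fuel (cntLE dep x : Int) = (cntLE dep x : Int) := by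
  have hfail : ¬ ((cntLE dep x : Int) < (dep.length : Int) ∧
      PySem.List.pyGetD dep (cntLE dep x : Int) 0 ≤ x) := by
    rintro ⟨hlt, hle⟩
    have hklen : cntLE dep x < dep.length := by exact_mod_cast hlt
    rw [PySem.List.pyGetD_eq_getElem dep 0 (by omega) (by omega)] at hle
    have := (cntLE_char dep x hs (cntLE dep x) hklen).mp (by simpa using hle)
    omega
  intro fuel
  cases fuel with
  | zero => rfl
  | succ n =>
    show (if _ then advanceGo dep x n ((cntLE dep x : Int) + 1) else (cntLE dep x : Int)) = _
    rw [if_neg hfail]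

-- the two-pointer advance reaches exactly cntLE when started at or below it
theorem advanceGo_eq (dep : List Int) (x : Int) (hs : dep.Pairwise (· ≤ ·)) :
    ∀ (fuel : Nat) (j : Int), 0 ≤ j → j ≤ (cntLE dep x : Int) → (cntLE dep x : Int) ≤ j + fuel →
      advanceGo dep x fuel j = (cntLE dep x : Int) := by
  intro fuel
  induction fuel with
  | zero =>
    intro j h0 h1 h2
    have hj : j = (cntLE dep x : Int) := by omega
    subst hj
    rfl
  | succ n ih =>
    intro j h0 h1 h2
    by_cases hj : j = (cntLE dep x : Int)
    · subst hj
      exact advanceGo_stop dep x hs (n + 1)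
    · have hjlt : j < (cntLE dep x : Int) := lt_of_le_of_ne h1 hj
      have hjn : j.toNat < cntLE dep x := by omega
      have hjlen : j.toNat < dep.length := lt_of_lt_of_le hjn (cntLE_le_length dep x)
      have hle : PySem.List.pyGetD dep j 0 ≤ x := by
        rw [PySem.List.pyGetD_eq_getElem dep 0 (by omega) (by omega)]
        exact (cntLE_char dep x hs j.toNat hjlen).mpr hjn
      have hcond : j < (dep.length : Int) ∧ PySem.List.pyGetD dep j 0 ≤ x :=
        ⟨by omega, hle⟩
      show (if _ then advanceGo dep x n (j + 1) else j) = _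
      rw [if_pos hcond]
      exact ih (j + 1) (by omega) (by omega) (by omega)

theorem advance_eq (dep : List Int) (x : Int) (hs : dep.Pairwise (· ≤ ·)) (j : Int)
    (h0 : 0 ≤ j) (h1 : j ≤ (cntLE dep x : Int)) :
    advance dep x j = (cntLE dep x : Int) := by
  have hc := cntLE_le_length dep x
  exact advanceGo_eq dep x hs dep.length j h0 h1 (by omega)

-- the binary-search loop converges to max (cntLE - 1) 0
theorem findIndexGo_eq (dep : List Int) (x : Int) (hs : dep.Pairwise (· ≤ ·)) :
    ∀ (fuel : Nat) (l r : Int), 0 ≤ l → l ≤ r → r < (dep.length : Int) →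
      l ≤ max ((cntLE dep x : Int) - 1) 0 → max ((cntLE dep x : Int) - 1) 0 ≤ r →
      (r - l).toNat ≤ fuel →
      findIndexGo dep x fuel l r = max ((cntLE dep x : Int) - 1) 0 := by
  intro fuel
  induction fuel with
  | zero =>
    intro l r h0 hlr hrlen hlM hMr hfuel
    have : l = r := by omega
    subst this
    show l = max ((cntLE dep x : Int) - 1) 0
    omega
  | succ n ih =>
    intro l r h0 hlr hrlen hlM hMr hfuel
    by_cases hlt : l < r
    · have hb := PySem.Int.floordiv_two_mid_bounds (lo := l + 1) (hi := r) (by omega)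
      have he : l + 1 + r = l + r + 1 := by ring
      rw [he] at hb
      set m := PySem.Int.floordiv (l + r + 1) 2 with hm
      have hmlen : m.toNat < dep.length := by omega
      have hget : PySem.List.pyGetD dep m 0 = dep[m.toNat] :=
        PySem.List.pyGetD_eq_getElem dep 0 (by omega) (by omega)
      have hstep : findIndexGo dep x (n + 1) l r =
          if PySem.List.pyGetD dep m 0 > x then findIndexGo dep x n l (m - 1)
          else findIndexGo dep x n m r := by
        show (if l < r then _ else l) = _
        rw [if_pos hlt]
      rw [hstep]
      by_cases hc : PySem.List.pyGetD dep m 0 > x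
      · rw [if_pos hc]
        have hgt : ¬ dep[m.toNat] ≤ x := by rw [hget] at hc; omega
        have hcm : ¬ m.toNat < cntLE dep x := fun h =>
          hgt ((cntLE_char dep x hs m.toNat hmlen).mpr h)
        exact ih l (m - 1) h0 (by omega) (by omega) hlM (by omega) (by omega)
      · rw [if_neg hc]
        have hle : dep[m.toNat] ≤ x := by rw [hget] at hc; omega
        have hcm : m.toNat < cntLE dep x := (cntLE_char dep x hs m.toNat hmlen).mp hle
        exact ih m r (by omega) (by omega) hrlen (by omega) hMr (by omega)
    · show (if l < r then _ else l) = _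
      rw [if_neg hlt]
      omega

theorem findIndex_eq (dep : List Int) (x : Int) (hs : dep.Pairwise (· ≤ ·)) (hne : dep ≠ []) :
    findIndex dep x = (cntLE dep x : Int) - 1 := by
  have hlen : 0 < dep.length := List.length_pos_of_ne_nil hne
  have hcle := cntLE_le_length dep x
  set M : Int := max ((cntLE dep x : Int) - 1) 0 with hM
  have hloop : findIndexGo dep x dep.length 0 ((dep.length : Int) - 1) = M := by
    exact findIndexGo_eq dep x hs dep.length 0 ((dep.length : Int) - 1)
      (le_refl 0) (by omega) (by omega) (by omega) (by omega) (by omega)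
  unfold findIndex
  rw [hloop]
  have hMlen : M.toNat < dep.length := by omega
  have hget : PySem.List.pyGetD dep M 0 = dep[M.toNat] :=
    PySem.List.pyGetD_eq_getElem dep 0 (by omega) (by omega)
  show (if PySem.List.pyGetD dep M 0 ≤ x then M else M - 1) = (cntLE dep x : Int) - 1
  rw [hget]
  by_cases hc : cntLE dep x = 0
  · have hnot : ¬ dep[M.toNat] ≤ x := fun h => by
      have := (cntLE_char dep x hs M.toNat hMlen).mp h; omega
    rw [if_neg hnot]
    omega
  · have hMn : M.toNat < cntLE dep x := by omega
    have hyes : dep[M.toNat] ≤ x := (cntLE_char dep x hs M.toNat hMlen).mpr hMn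
    rw [if_pos hyes]
    omega

-- the two loops agree on a sorted arrival list when j starts at or below every cntLE ahead
theorem loop_eq (dep : List Int) (K : Int) (hs : dep.Pairwise (· ≤ ·)) (hne : dep ≠ []) :
    ∀ (l : List Int), l.Pairwise (· ≤ ·) →
      ∀ (i j : Int), 0 ≤ j → (∀ a ∈ l, j ≤ (cntLE dep a : Int)) →
      hotelLoopA dep K l i = hotelAltLoop dep K l i j := by
  intro l
  induction l with
  | nil => intro _ i j _ _; rfl
  | cons a rest ih =>
    intro hl i j h0 hb
    rw [List.pairwise_cons] at hl
    have hfi : findIndex dep a = (cntLE dep a : Int) - 1 := findIndex_eq dep a hs hne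
    have hadv : advance dep a j = (cntLE dep a : Int) :=
      advance_eq dep a hs j h0 (hb a (List.mem_cons_self))
    show (if i - findIndex dep a > K then false
          else hotelLoopA dep K rest (i + 1)) =
         (if (i + 1) - advance dep a j > K then false
          else hotelAltLoop dep K rest (i + 1) (advance dep a j))
    rw [hfi, hadv]
    by_cases hK : (i + 1) - (cntLE dep a : Int) > K
    · rw [if_pos (show i - ((cntLE dep a : Int) - 1) > K by omega), if_pos hK]
    · rw [if_neg (show ¬ i - ((cntLE dep a : Int) - 1) > K by omega), if_neg hK]
      refine ih hl.2 (i + 1) (cntLE dep a : Int) (by positivity) ?_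
      intro b hbmem
      exact_mod_cast cntLE_mono dep a b (hl.1 b hbmem)

-- ===== VERDICT (by name: the statement is the Claim_ definition above) =====
theorem hotel_spec : Claim_equal_hotel := by
  intro arrive depart K _ hpre
  unfold Spec_hotel hotel hotel_alt
  set aS := PySem.List.sorted arrive (fun y => y) false with haS
  set dS := PySem.List.sorted depart (fun y => y) false with hdS
  by_cases ha : aS = []
  · rw [ha]; rfl
  · have harr : arrive ≠ [] := by
      intro h; apply ha; rw [haS, h]; rfl
    have hdne : depart ≠ [] := by
      rcases hpre with h | h
      · exact absurd h harr
      · exact h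
    have hdSne : dS ≠ [] := by
      rw [hdS, Ne, PySem.List.sorted_eq_nil_iff]; exact hdne
    have hsd : dS.Pairwise (· ≤ ·) := by
      rw [hdS]; exact PySem.List.sorted_pairwise depart (fun y => y)
    have hsa : aS.Pairwise (· ≤ ·) := by
      rw [haS]; exact PySem.List.sorted_pairwise arrive (fun y => y)
    exact loop_eq dS K hsd hdSne aS hsa 0 0 (le_refl 0) (fun a _ => Int.natCast_nonneg _)
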